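-- pv_equiv track=rewrite | github.com/KC1064/Readme-Generator | dependency_parser.py | parse_requirements_txt
-- ===== SOURCE A (Python) =====
-- def parse_requirements_txt(content):
--     """Parse requirements.txt content to extract dependencies."""
--     dependencies = {}
--     if not isinstance(content, str):
--         return {}
--     lines = content.strip().split('\n')
--     for line in lines:
--         line = line.strip()
--         if not line or line.startswith('#'):
--             continue
--
--         parts = line.split(';', 1)
--         package_spec = parts[0].strip()
--
--         if '==' in package_spec:
--             name, version = package_spec.split('==', 1)
--             dependencies[name.strip()] = version.strip()
--         elif '>=' in package_spec:
--              name, version = package_spec.split('>=', 1)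
--              dependencies[name.strip()] = f">={version.strip()}"
--         elif '<=' in package_spec:
--              name, version = package_spec.split('<=', 1)
--              dependencies[name.strip()] = f"<={version.strip()}"
--         elif '>' in package_spec:
--              name, version = package_spec.split('>', 1)
--              dependencies[name.strip()] = f">{version.strip()}"
--         elif '<' in package_spec:
--              name, version = package_spec.split('<', 1)
--              dependencies[name.strip()] = f"<{version.strip()}"
--         elif '~=' in package_spec:
--              name, version = package_spec.split('~=', 1)
--              dependencies[name.strip()] = f"~={version.strip()}"
--         else:
--             name = package_spec
--             if '[' in name and ']' in name:
--                  name = name.split('[', 1)[0].strip()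
--             if name:
--                 dependencies[name] = "Any"
--
--     return dependencies
-- ===== SOURCE B (Python) =====
-- # Different algorithm: instead of A's elif ladder of substring tests + split() calls
-- # (each rescanning the spec), B makes ONE character-level scan per spec recording the
-- # first occurrence index of every operator (and of '['/']'), then selects the winning
-- # operator by priority and slices the spec at the recorded index.
-- def parse_requirements_txt(content):
--     """Parse requirements.txt content to extract dependencies."""
--     if not isinstance(content, str):
--         return {}
--     dependencies = {}
--     for raw in content.strip().split('\n'):
--         line = raw.strip()
--         if not line or line.startswith('#'):
--             continue
--         spec = line.split(';', 1)[0].strip()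
--         n = len(spec)
--         pos = {'==': -1, '>=': -1, '<=': -1, '>': -1, '<': -1, '~=': -1, '[': -1}
--         saw_rb = False
--         for i in range(n):
--             c = spec[i]
--             nxt = spec[i + 1] if i + 1 < n else ''
--             if c == '=':
--                 if nxt == '=' and pos['=='] < 0:
--                     pos['=='] = i
--             elif c == '>':
--                 if nxt == '=' and pos['>='] < 0:
--                     pos['>='] = i
--                 if pos['>'] < 0:
--                     pos['>'] = i
--             elif c == '<':
--                 if nxt == '=' and pos['<='] < 0:
--                     pos['<='] = i
--                 if pos['<'] < 0:
--                     pos['<'] = i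
--             elif c == '~':
--                 if nxt == '=' and pos['~='] < 0:
--                     pos['~='] = i
--             elif c == '[':
--                 if pos['['] < 0:
--                     pos['['] = i
--             elif c == ']':
--                 saw_rb = True
--         for op, tag in (('==', ''), ('>=', '>='), ('<=', '<='),
--                         ('>', '>'), ('<', '<'), ('~=', '~=')):
--             i = pos[op]
--             if i >= 0:
--                 dependencies[spec[:i].strip()] = tag + spec[i + len(op):].strip()
--                 break
--         else:
--             name = spec
--             if pos['['] >= 0 and saw_rb:
--                 name = spec[:pos['[']].strip()
--             if name:
--                 dependencies[name] = "Any"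
--     return dependencies
-- ===== Notes on version B (the rewrite author's own statement) =====
-- stated objective: alternative
-- what changed: Per line, B replaces A's elif ladder of repeated substring-membership tests and split() calls by a single character-level scan that records the first index of every operator (and of '['/']'), then picks the winning operator by priority and slices the spec at the recorded index.
import Mathlib
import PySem

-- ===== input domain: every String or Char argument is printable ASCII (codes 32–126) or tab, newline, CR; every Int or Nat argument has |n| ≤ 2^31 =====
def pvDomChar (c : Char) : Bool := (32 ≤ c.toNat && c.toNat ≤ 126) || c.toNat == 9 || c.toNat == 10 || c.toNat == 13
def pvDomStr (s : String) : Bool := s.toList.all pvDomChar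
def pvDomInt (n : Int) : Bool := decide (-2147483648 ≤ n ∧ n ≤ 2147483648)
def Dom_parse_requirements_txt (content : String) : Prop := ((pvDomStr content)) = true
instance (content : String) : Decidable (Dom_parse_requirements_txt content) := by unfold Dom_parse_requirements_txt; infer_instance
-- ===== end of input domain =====

-- B replaces A's elif ladder of substring tests + split() calls (up to 7 rescans of each
-- spec) by ONE character-level scan recording first-occurrence indices, then a priority
-- pick and index slicing (objective: alternative algorithm, same asymptotic cost).

-- ===== PORT A =====
-- one iteration of A's for-loop: update the dict from one raw line
def pvASpec (d : PySem.Dict String String) (spec : String) : PySem.Dict String String :=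
  if PySem.Str.isIn "==" spec then
    let ps := (PySem.Str.splitMax? spec "==" 1).getD []
    d.insert (PySem.Str.strip (ps.headD "")) (PySem.Str.strip (ps.getD 1 ""))
  else if PySem.Str.isIn ">=" spec then
    let ps := (PySem.Str.splitMax? spec ">=" 1).getD []
    d.insert (PySem.Str.strip (ps.headD "")) (">=" ++ PySem.Str.strip (ps.getD 1 ""))
  else if PySem.Str.isIn "<=" spec then
    let ps := (PySem.Str.splitMax? spec "<=" 1).getD []
    d.insert (PySem.Str.strip (ps.headD "")) ("<=" ++ PySem.Str.strip (ps.getD 1 ""))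
  else if PySem.Str.isIn ">" spec then
    let ps := (PySem.Str.splitMax? spec ">" 1).getD []
    d.insert (PySem.Str.strip (ps.headD "")) (">" ++ PySem.Str.strip (ps.getD 1 ""))
  else if PySem.Str.isIn "<" spec then
    let ps := (PySem.Str.splitMax? spec "<" 1).getD []
    d.insert (PySem.Str.strip (ps.headD "")) ("<" ++ PySem.Str.strip (ps.getD 1 ""))
  else if PySem.Str.isIn "~=" spec then
    let ps := (PySem.Str.splitMax? spec "~=" 1).getD []
    d.insert (PySem.Str.strip (ps.headD "")) ("~=" ++ PySem.Str.strip (ps.getD 1 ""))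
  else
    let name := if PySem.Str.isIn "[" spec && PySem.Str.isIn "]" spec
                then PySem.Str.strip (((PySem.Str.splitMax? spec "[" 1).getD []).headD "")
                else spec
    if name ≠ "" then d.insert name "Any" else d

def pvALine (d : PySem.Dict String String) (line0 : String) : PySem.Dict String String :=
  let line := PySem.Str.strip line0
  if line = "" || PySem.Str.startswith line "#" then d
  else pvASpec d (PySem.Str.strip (((PySem.Str.splitMax? line ";" 1).getD []).headD ""))

def parse_requirements_txt (content : String) : List (String × String) :=
  (((PySem.Str.split? (PySem.Str.strip content) "\n").getD []).foldl pvALine PySem.Dict.empty).items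

-- ===== PORT B =====
-- the scan state: first index of each operator / '[' (-1 = not seen yet), ']' seen
structure pvSt where
  eqP : Int
  geP : Int
  leP : Int
  gtP : Int
  ltP : Int
  tiP : Int
  lbP : Int
  rb : Bool
deriving Repr, DecidableEq

def pvC (spec : String) (i : Int) : Char := (PySem.Str.pyGet? spec i).getD ' '
def pvN (spec : String) (i : Int) : Option Char :=
  if i + 1 < PySem.Str.len spec then PySem.Str.pyGet? spec (i + 1) else none

-- body of Source B's scan loop, for index i
def pvStep (spec : String) (st : pvSt) (i : Int) : pvSt :=
  let c := pvC spec i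
  let nxt := pvN spec i
  if c = '=' then
    (if nxt = some '=' ∧ st.eqP < 0 then { st with eqP := i } else st)
  else if c = '>' then
    let st := if nxt = some '=' ∧ st.geP < 0 then { st with geP := i } else st
    if st.gtP < 0 then { st with gtP := i } else st
  else if c = '<' then
    let st := if nxt = some '=' ∧ st.leP < 0 then { st with leP := i } else st
    if st.ltP < 0 then { st with ltP := i } else st
  else if c = '~' then
    (if nxt = some '=' ∧ st.tiP < 0 then { st with tiP := i } else st)
  else if c = '[' then
    (if st.lbP < 0 then { st with lbP := i } else st)
  else if c = ']' then { st with rb := true }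
  else st

def pvScan (spec : String) : pvSt :=
  (PySem.List.pyRange 0 (PySem.Str.len spec) 1).foldl (pvStep spec)
    ⟨-1, -1, -1, -1, -1, -1, -1, false⟩

-- Source B's priority loop over (op, tag) pairs with the recorded position attached;
-- the [] case is the for-loop's else branch
def pvPick (d : PySem.Dict String String) (spec : String) (st : pvSt) :
    List (String × String × Int) → PySem.Dict String String
  | [] =>
    let name := if 0 ≤ st.lbP ∧ st.rb
                then PySem.Str.strip (PySem.Str.slice spec none (some st.lbP))
                else spec
    if name ≠ "" then d.insert name "Any" else d
  | (op, tag, i) :: rest =>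
    if 0 ≤ i then
      d.insert (PySem.Str.strip (PySem.Str.slice spec none (some i)))
        (tag ++ PySem.Str.strip (PySem.Str.slice spec (some (i + PySem.Str.len op)) none))
    else pvPick d spec st rest

def pvBSpec (d : PySem.Dict String String) (spec : String) : PySem.Dict String String :=
  let st := pvScan spec
  pvPick d spec st
    [("==", "", st.eqP), (">=", ">=", st.geP), ("<=", "<=", st.leP),
     (">", ">", st.gtP), ("<", "<", st.ltP), ("~=", "~=", st.tiP)]

def pvBLine (d : PySem.Dict String String) (raw : String) : PySem.Dict String String :=
  let line := PySem.Str.strip raw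
  if line = "" || PySem.Str.startswith line "#" then d
  else pvBSpec d (PySem.Str.strip (((PySem.Str.splitMax? line ";" 1).getD []).headD ""))

def parse_requirements_txt_alt (content : String) : List (String × String) :=
  (((PySem.Str.split? (PySem.Str.strip content) "\n").getD []).foldl pvBLine PySem.Dict.empty).items

-- ===== PRECONDITION & SPEC =====
def Spec_parse_requirements_txt (content : String) (out : List (String × String)) : Prop := out = parse_requirements_txt_alt content
instance (content : String) (out : List (String × String)) : Decidable (Spec_parse_requirements_txt content out) := by unfold Spec_parse_requirements_txt; infer_instance

-- ===== CLAIM (what is proved, stated in full; the proofs are below) =====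
def Claim_equal_parse_requirements_txt : Prop := ∀ (content : String), Dom_parse_requirements_txt content → Spec_parse_requirements_txt content (parse_requirements_txt content)

-- ===== LEMMAS AND PROOFS =====

-- prefix of a drop, expressed by indexing
theorem pvPairPrefix (a b : Char) (l : List Char) :
    [a, b] <+: l ↔ l[0]? = some a ∧ l[1]? = some b := by
  match l with
  | [] => simp
  | [x] => simp [List.cons_prefix_cons]
  | x :: y :: t =>
    simp only [List.cons_prefix_cons, List.nil_prefix, and_true,
      List.getElem?_cons_zero, List.getElem?_cons_succ, Option.some.injEq]
    constructor <;> (rintro ⟨rfl, rfl⟩; exact ⟨rfl, rfl⟩)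

theorem pvSinglePrefix (a : Char) (l : List Char) :
    [a] <+: l ↔ l[0]? = some a := by
  match l with
  | [] => simp
  | x :: t =>
    simp only [List.cons_prefix_cons, List.nil_prefix, and_true,
      List.getElem?_cons_zero, Option.some.injEq]
    exact ⟨fun h => h.symm, fun h => h.symm⟩

theorem pvFind_eq_of_first (cs sub : List Char) (i : Nat) (hi : sub <+: cs.drop i)
    (hmin : ∀ j < i, ¬ sub <+: cs.drop j) : PySem.Chars.find cs sub = (i : Int) := by
  have hinf : sub <:+: cs := (PySem.Chars.isIn_iff_infix sub cs).1
    ((PySem.Chars.exists_prefix_drop_iff_isIn sub cs).1 ⟨i, hi⟩)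
  have hnn : 0 ≤ PySem.Chars.find cs sub := (PySem.Chars.find_nonneg_iff cs sub).2 hinf
  obtain ⟨hpre, hm⟩ := PySem.Chars.find_spec hnn
  rcases Nat.lt_trichotomy (PySem.Chars.find cs sub).toNat i with h | h | h
  · exact absurd hpre (hmin _ h)
  · omega
  · exact absurd hi (hm i h)

theorem pvFind_eq_neg_one (cs sub : List Char) (h : ∀ j, ¬ sub <+: cs.drop j) :
    PySem.Chars.find cs sub = -1 := by
  rw [PySem.Chars.find_eq_neg_one_iff]
  intro hinf
  have : PySem.Chars.isIn sub cs = true := (PySem.Chars.isIn_iff_infix sub cs).2 hinf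
  obtain ⟨j, hj⟩ := (PySem.Chars.exists_prefix_drop_iff_isIn sub cs).2 this
  exact h j hj

theorem pvScanFirst (P : Nat → Prop) [DecidablePred P] (n : Nat) :
    ((List.range n).foldl (fun acc i => if P i ∧ acc < 0 then (i : Int) else acc) (-1) = -1
        ∧ ∀ i < n, ¬ P i)
    ∨ (∃ k : Nat, (List.range n).foldl (fun acc i => if P i ∧ acc < 0 then (i : Int) else acc) (-1) = (k : Int)
        ∧ k < n ∧ P k ∧ ∀ j < k, ¬ P j) := by
  induction n with
  | zero => left; simp
  | succ n ih =>
    rw [List.range_succ, List.foldl_append]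
    rcases ih with ⟨h1, h2⟩ | ⟨k, hk, hkn, hPk, hmin⟩
    · rw [h1]
      by_cases hP : P n
      · right
        exact ⟨n, by simp [hP], Nat.lt_succ_self n, hP, h2⟩
      · left
        refine ⟨by simp [hP], ?_⟩
        intro i hi
        rcases Nat.lt_succ_iff_lt_or_eq.1 hi with h | h
        · exact h2 i h
        · subst h; exact hP
    · right
      refine ⟨k, ?_, Nat.lt_succ_of_lt hkn, hPk, hmin⟩
      rw [hk]
      have : ¬ ((k : Int) < 0) := by omega
      simp [this]

theorem pvFirst_eq_find (sub : List Char) (hsub : sub ≠ []) (cs : List Char) :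
    (List.range cs.length).foldl
      (fun acc i => if sub <+: cs.drop i ∧ acc < 0 then (i : Int) else acc) (-1)
      = PySem.Chars.find cs sub := by
  rcases pvScanFirst (fun i => sub <+: cs.drop i) cs.length with ⟨h1, h2⟩ | ⟨k, hk, hkn, hPk, hmin⟩
  · rw [h1]
    refine (pvFind_eq_neg_one cs sub ?_).symm
    intro j hj
    by_cases hjl : j < cs.length
    · exact h2 j hjl hj
    · rw [List.drop_eq_nil_of_le (by omega)] at hj
      exact hsub (List.prefix_nil.1 hj)
  · rw [hk, pvFind_eq_of_first cs sub k hPk hmin]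

theorem pvFoldlProj {α β γ : Type} (f : α → γ → α) (p : α → β) (g : β → γ → β)
    (h : ∀ a c, p (f a c) = g (p a) c) (l : List γ) (a : α) :
    p (l.foldl f a) = l.foldl g (p a) := by
  induction l generalizing a with
  | nil => rfl
  | cons x t ih => simp only [List.foldl_cons, ih, h]

theorem pvFoldOr {γ : Type} (P : γ → Prop) [DecidablePred P] (l : List γ) (b : Bool) :
    l.foldl (fun ok i => if P i then true else ok) b = (b || l.any (fun i => decide (P i))) := by
  induction l generalizing b with
  | nil => simp
  | cons x t ih =>
    simp only [List.foldl_cons, List.any_cons, ih]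
    by_cases h : P x <;> simp [h]

theorem pvCond1 (spec : String) (a : Char) (k : Nat) (hk : k < spec.toList.length) :
    (pvC spec (k : Int) = a) ↔ [a] <+: spec.toList.drop k := by
  rw [pvSinglePrefix, List.getElem?_drop, Nat.add_zero]
  unfold pvC
  rw [PySem.Str.pyGet?_natCast, List.getElem?_eq_getElem hk]
  simp

theorem pvCond2 (spec : String) (a b : Char) (k : Nat) (hk : k < spec.toList.length) :
    (pvC spec (k : Int) = a ∧ pvN spec (k : Int) = some b) ↔ [a, b] <+: spec.toList.drop k := by
  rw [pvPairPrefix]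
  simp only [List.getElem?_drop, Nat.add_zero]
  unfold pvC pvN
  have h0 : (k : Int) + 1 = ((k + 1 : Nat) : Int) := by push_cast; ring
  have hlen : PySem.Str.len spec = ((spec.toList.length : Nat) : Int) := PySem.Str.len_eq spec
  rw [PySem.Str.pyGet?_natCast, List.getElem?_eq_getElem hk, h0, PySem.Str.pyGet?_natCast, hlen]
  by_cases h1 : k + 1 < spec.toList.length
  · have hc : ((k + 1 : Nat) : Int) < ((spec.toList.length : Nat) : Int) := by exact_mod_cast h1
    rw [if_pos hc]
    simp
  · have hc : ¬ ((k + 1 : Nat) : Int) < ((spec.toList.length : Nat) : Int) := by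
      intro hh; exact h1 (by exact_mod_cast hh)
    rw [if_neg hc, List.getElem?_eq_none (by omega : spec.toList.length ≤ k + 1)]
    simp

theorem pvStep_eqP (spec : String) (st : pvSt) (i : Int) :
    (pvStep spec st i).eqP =
      if (pvC spec i = '=' ∧ pvN spec i = some '=') ∧ st.eqP < 0 then i else st.eqP := by
  unfold pvStep
  dsimp only
  split_ifs <;> simp_all

theorem pvStep_geP (spec : String) (st : pvSt) (i : Int) :
    (pvStep spec st i).geP =
      if (pvC spec i = '>' ∧ pvN spec i = some '=') ∧ st.geP < 0 then i else st.geP := by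
  unfold pvStep
  dsimp only
  split_ifs <;> simp_all

theorem pvStep_leP (spec : String) (st : pvSt) (i : Int) :
    (pvStep spec st i).leP =
      if (pvC spec i = '<' ∧ pvN spec i = some '=') ∧ st.leP < 0 then i else st.leP := by
  unfold pvStep
  dsimp only
  split_ifs <;> simp_all

theorem pvStep_gtP (spec : String) (st : pvSt) (i : Int) :
    (pvStep spec st i).gtP =
      if (pvC spec i = '>') ∧ st.gtP < 0 then i else st.gtP := by
  unfold pvStep
  dsimp only
  split_ifs <;> simp_all

theorem pvStep_ltP (spec : String) (st : pvSt) (i : Int) :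
    (pvStep spec st i).ltP =
      if (pvC spec i = '<') ∧ st.ltP < 0 then i else st.ltP := by
  unfold pvStep
  dsimp only
  split_ifs <;> simp_all

theorem pvStep_tiP (spec : String) (st : pvSt) (i : Int) :
    (pvStep spec st i).tiP =
      if (pvC spec i = '~' ∧ pvN spec i = some '=') ∧ st.tiP < 0 then i else st.tiP := by
  unfold pvStep
  dsimp only
  split_ifs <;> simp_all

theorem pvStep_lbP (spec : String) (st : pvSt) (i : Int) :
    (pvStep spec st i).lbP =
      if (pvC spec i = '[') ∧ st.lbP < 0 then i else st.lbP := by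
  unfold pvStep
  dsimp only
  split_ifs <;> simp_all

theorem pvStep_rb (spec : String) (st : pvSt) (i : Int) :
    (pvStep spec st i).rb = if pvC spec i = ']' then true else st.rb := by
  unfold pvStep
  dsimp only
  split_ifs <;> simp_all

-- the scanned indices are exactly the pyRange over the length
theorem pvScan_list (spec : String) :
    PySem.List.pyRange 0 (PySem.Str.len spec) 1
      = (List.range spec.toList.length).map (fun k : Nat => (k : Int)) := by
  rw [PySem.Str.len_eq, PySem.List.pyRange_zero_natCast]

-- one scanned field, as a fold over Nat indices
theorem pvScan_field (spec : String) (p : pvSt → Int) (Q : Int → Prop) [DecidablePred Q]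
    (hp : ∀ st i, p (pvStep spec st i) = if Q i ∧ p st < 0 then i else p st)
    (hinit : p ⟨-1, -1, -1, -1, -1, -1, -1, false⟩ = -1) :
    p (pvScan spec)
      = (List.range spec.toList.length).foldl
          (fun (acc : Int) (k : Nat) => if Q (k : Int) ∧ acc < 0 then (k : Int) else acc) (-1) := by
  unfold pvScan
  rw [pvFoldlProj (pvStep spec) p (fun acc i => if Q i ∧ acc < 0 then i else acc) hp]
  rw [pvScan_list, List.foldl_map, hinit]

theorem pvScan_find2 (spec : String) (a b : Char) (p : pvSt → Int)
    (hp : ∀ st i, p (pvStep spec st i)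
      = if (pvC spec i = a ∧ pvN spec i = some b) ∧ p st < 0 then i else p st)
    (hinit : p ⟨-1, -1, -1, -1, -1, -1, -1, false⟩ = -1) :
    p (pvScan spec) = PySem.Chars.find spec.toList [a, b] := by
  rw [pvScan_field spec p (fun i => pvC spec i = a ∧ pvN spec i = some b) hp hinit,
    ← pvFirst_eq_find [a, b] (by simp) spec.toList]
  refine PySem.List.foldl_congr_mem _ _ _ _ ?_
  intro acc k hk
  have hklt : k < spec.toList.length := List.mem_range.1 hk
  exact if_congr (and_congr_left' (pvCond2 spec a b k hklt)) rfl rfl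

theorem pvScan_find1 (spec : String) (a : Char) (p : pvSt → Int)
    (hp : ∀ st i, p (pvStep spec st i)
      = if (pvC spec i = a) ∧ p st < 0 then i else p st)
    (hinit : p ⟨-1, -1, -1, -1, -1, -1, -1, false⟩ = -1) :
    p (pvScan spec) = PySem.Chars.find spec.toList [a] := by
  rw [pvScan_field spec p (fun i => pvC spec i = a) hp hinit,
    ← pvFirst_eq_find [a] (by simp) spec.toList]
  refine PySem.List.foldl_congr_mem _ _ _ _ ?_
  intro acc k hk
  have hklt : k < spec.toList.length := List.mem_range.1 hk
  exact if_congr (and_congr_left' (pvCond1 spec a k hklt)) rfl rfl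

theorem pvScan_rb (spec : String) :
    (pvScan spec).rb = PySem.Chars.isIn [']'] spec.toList := by
  unfold pvScan
  rw [pvFoldlProj (pvStep spec) (fun st => st.rb)
    (fun ok i => if pvC spec i = ']' then true else ok) (pvStep_rb spec),
    pvScan_list, List.foldl_map, pvFoldOr]
  simp only [Bool.false_or]
  by_cases h : PySem.Chars.isIn [']'] spec.toList = true
  · obtain ⟨j, hj⟩ := (PySem.Chars.exists_prefix_drop_iff_isIn _ _).2 h
    have hjl : j < spec.toList.length := by
      by_contra hge
      rw [List.drop_eq_nil_of_le (by omega)] at hj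
      simp at hj
    rw [h]
    simp only [List.any_eq_true]
    exact ⟨j, List.mem_range.2 hjl, decide_eq_true ((pvCond1 spec ']' j hjl).2 hj)⟩
  · rw [Bool.not_eq_true] at h
    rw [h]
    simp only [List.any_eq_false]
    intro k hk
    have hklt : k < spec.toList.length := List.mem_range.1 hk
    simp only [decide_eq_true_eq]
    intro hc
    have := (PySem.Chars.exists_prefix_drop_iff_isIn [']'] spec.toList).1
      ⟨k, (pvCond1 spec ']' k hklt).1 hc⟩
    rw [h] at this
    exact absurd this (by simp)


theorem pvScan_eq (spec : String) :
    pvScan spec =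
      ⟨PySem.Chars.find spec.toList ['=', '='], PySem.Chars.find spec.toList ['>', '='],
       PySem.Chars.find spec.toList ['<', '='], PySem.Chars.find spec.toList ['>'],
       PySem.Chars.find spec.toList ['<'], PySem.Chars.find spec.toList ['~', '='],
       PySem.Chars.find spec.toList ['['], PySem.Chars.isIn [']'] spec.toList⟩ := by
  have heq := pvScan_find2 spec '=' '=' (fun st => st.eqP) (pvStep_eqP spec) rfl
  have hge := pvScan_find2 spec '>' '=' (fun st => st.geP) (pvStep_geP spec) rfl
  have hle := pvScan_find2 spec '<' '=' (fun st => st.leP) (pvStep_leP spec) rfl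
  have hgt := pvScan_find1 spec '>' (fun st => st.gtP) (pvStep_gtP spec) rfl
  have hlt := pvScan_find1 spec '<' (fun st => st.ltP) (pvStep_ltP spec) rfl
  have hti := pvScan_find2 spec '~' '=' (fun st => st.tiP) (pvStep_tiP spec) rfl
  have hlb := pvScan_find1 spec '[' (fun st => st.lbP) (pvStep_lbP spec) rfl
  have hrb := pvScan_rb spec
  cases hs : pvScan spec
  rw [hs] at heq hge hle hgt hlt hti hlb hrb
  simp_all

-- split(sep, 1) in terms of find
theorem pvGo0 (sep : List Char) (fuel : Nat) (l : List Char) (acc : List (List Char)) :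
    PySem.Chars.splitOnMax.go sep fuel 0 l [] acc = (l :: acc).reverse := by
  cases fuel <;> cases l <;> simp [PySem.Chars.splitOnMax.go]

theorem pvFind_cons (sep : List Char) (c : Char) (rest : List Char) (_hsep : sep ≠ [])
    (h : ¬ sep <+: (c :: rest)) :
    PySem.Chars.find (c :: rest) sep =
      if PySem.Chars.find rest sep = -1 then -1 else 1 + PySem.Chars.find rest sep := by
  by_cases hr : PySem.Chars.find rest sep = -1
  · rw [if_pos hr]
    refine pvFind_eq_neg_one _ _ ?_
    intro j
    match j with
    | 0 => exact h
    | j + 1 =>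
      rw [List.drop_succ_cons]
      intro hj
      have : PySem.Chars.isIn sep rest = true :=
        (PySem.Chars.exists_prefix_drop_iff_isIn sep rest).1 ⟨j, hj⟩
      rw [PySem.Chars.find_eq_neg_one_iff] at hr
      exact hr ((PySem.Chars.isIn_iff_infix sep rest).1 this)
  · rw [if_neg hr]
    have hnn : 0 ≤ PySem.Chars.find rest sep := by
      have := PySem.Chars.neg_one_le_find rest sep
      omega
    obtain ⟨hpre, hm⟩ := PySem.Chars.find_spec hnn
    have : PySem.Chars.find (c :: rest) sep = ((PySem.Chars.find rest sep).toNat + 1 : Nat) := by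
      refine pvFind_eq_of_first _ _ _ ?_ ?_
      · rw [List.drop_succ_cons]; exact hpre
      · intro j hj
        match j with
        | 0 => exact h
        | j + 1 =>
          rw [List.drop_succ_cons]
          exact hm j (by omega)
    rw [this]
    omega

theorem pvGo1 (sep : List Char) (hsep : sep ≠ []) :
    ∀ (l : List Char) (fuel : Nat), l.length < fuel → ∀ (cur : List Char) (acc : List (List Char)),
    PySem.Chars.splitOnMax.go sep fuel 1 l cur acc =
      if PySem.Chars.find l sep = -1 then ((cur.reverse ++ l) :: acc).reverse
      else ((l.drop ((PySem.Chars.find l sep).toNat + sep.length)) ::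
            (cur.reverse ++ l.take (PySem.Chars.find l sep).toNat) :: acc).reverse := by
  intro l
  induction l with
  | nil =>
    intro fuel hf cur acc
    match fuel, hf with
    | fuel + 1, _ =>
      have hfind : PySem.Chars.find [] sep = -1 := by
        refine pvFind_eq_neg_one _ _ ?_
        intro j hj
        simp at hj
        exact hsep hj
      rw [hfind]
      simp [PySem.Chars.splitOnMax.go]
  | cons c rest ih =>
    intro fuel hf cur acc
    match fuel, hf with
    | fuel + 1, hf =>
      by_cases hp : sep.isPrefixOf (c :: rest)
      · have hpre : sep <+: (c :: rest) := List.isPrefixOf_iff_prefix.1 hp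
        have hfind : PySem.Chars.find (c :: rest) sep = (0 : Nat) :=
          pvFind_eq_of_first _ _ 0 hpre (by omega)
        rw [hfind]
        simp only [PySem.Chars.splitOnMax.go, hp, if_true]
        rw [pvGo0]
        simp
      · have hnp : ¬ sep <+: (c :: rest) := fun hh => hp (List.isPrefixOf_iff_prefix.2 hh)
        have hstep : PySem.Chars.splitOnMax.go sep (fuel + 1) 1 (c :: rest) cur acc =
            PySem.Chars.splitOnMax.go sep fuel 1 rest (c :: cur) acc := by
          simp [PySem.Chars.splitOnMax.go, hp]
        rw [hstep, ih fuel (by simp at hf; omega) (c :: cur) acc,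
          pvFind_cons sep c rest hsep hnp]
        by_cases hr : PySem.Chars.find rest sep = -1
        · simp [hr]
        · have hnn : 0 ≤ PySem.Chars.find rest sep := by
            have := PySem.Chars.neg_one_le_find rest sep
            omega
          have h1 : ¬ (1 + PySem.Chars.find rest sep = -1) := by omega
          have h2 : (1 + PySem.Chars.find rest sep).toNat
              = (PySem.Chars.find rest sep).toNat + 1 := by omega
          simp only [hr, if_false, h1, if_false, h2]
          rw [Nat.add_right_comm, List.drop_succ_cons, List.take_succ_cons]
          simp

theorem pvSplitMax1 (cs sep : List Char) (hsep : sep ≠ []) :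
    PySem.Chars.splitOnMax cs sep 1 =
      if PySem.Chars.find cs sep = -1 then [cs]
      else [cs.take (PySem.Chars.find cs sep).toNat,
            cs.drop ((PySem.Chars.find cs sep).toNat + sep.length)] := by
  have h : PySem.Chars.splitOnMax cs sep 1
      = PySem.Chars.splitOnMax.go sep (cs.length + 1) 1 cs [] [] := by
    simp [PySem.Chars.splitOnMax]
  rw [h, pvGo1 sep hsep cs (cs.length + 1) (by omega) [] []]
  by_cases hr : PySem.Chars.find cs sep = -1 <;> simp [hr]

-- pieces of split(op, 1) when op occurs, via find
theorem pvSplitPieces (spec op : String) (hop : op.toList ≠ [])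
    (h : 0 ≤ PySem.Chars.find spec.toList op.toList) :
    (PySem.Str.splitMax? spec op 1).getD []
      = [String.ofList (spec.toList.take (PySem.Chars.find spec.toList op.toList).toNat),
         String.ofList (spec.toList.drop
           ((PySem.Chars.find spec.toList op.toList).toNat + op.toList.length))] := by
  unfold PySem.Str.splitMax? PySem.Chars.splitMax?
  have hne : ¬ (op.toList.isEmpty = true) := by simpa using hop
  rw [if_neg hne, pvSplitMax1 spec.toList op.toList hop,
    if_neg (by omega : ¬ PySem.Chars.find spec.toList op.toList = -1)]
  simp

theorem pvKeyEq (spec op : String) (h : 0 ≤ PySem.Chars.find spec.toList op.toList) :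
    String.ofList (spec.toList.take (PySem.Chars.find spec.toList op.toList).toNat)
      = PySem.Str.slice spec none (some (PySem.Chars.find spec.toList op.toList)) := by
  refine String.toList_inj.mp ?_
  rw [PySem.Str.toList_slice]
  simp only [PySem.Chars.slice_eq_listSlice]
  rw [PySem.List.slice_to _ h]
  simp

theorem pvVerEq (spec op : String) (h : 0 ≤ PySem.Chars.find spec.toList op.toList) :
    String.ofList (spec.toList.drop
        ((PySem.Chars.find spec.toList op.toList).toNat + op.toList.length))
      = PySem.Str.slice spec (some (PySem.Chars.find spec.toList op.toList + PySem.Str.len op)) none := by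
  refine String.toList_inj.mp ?_
  rw [PySem.Str.toList_slice]
  simp only [PySem.Chars.slice_eq_listSlice]
  have hlen : PySem.Str.len op = ((op.toList.length : Nat) : Int) := PySem.Str.len_eq op
  rw [hlen, PySem.List.slice_from _
    (by omega : (0:Int) ≤ PySem.Chars.find spec.toList op.toList + ((op.toList.length : Nat) : Int))]
  have ht : (PySem.Chars.find spec.toList op.toList + ((op.toList.length : Nat) : Int)).toNat
      = (PySem.Chars.find spec.toList op.toList).toNat + op.toList.length := by omega
  rw [ht]
  simp

theorem pvIsIn_iff (spec op : String) :
    (PySem.Str.isIn op spec = true) ↔ 0 ≤ PySem.Chars.find spec.toList op.toList := by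
  rw [PySem.Str.isIn_eq, PySem.Chars.isIn_iff_infix, ← PySem.Chars.find_nonneg_iff]

theorem pvSpec_eq (d : PySem.Dict String String) (spec : String) :
    pvASpec d spec = pvBSpec d spec := by
  unfold pvASpec pvBSpec
  rw [pvScan_eq]
  simp only [pvPick]
  have e1 : ['=','='] = ("==" : String).toList := rfl
  have e2 : ['>','='] = (">=" : String).toList := rfl
  have e3 : ['<','='] = ("<=" : String).toList := rfl
  have e4 : ['>'] = (">" : String).toList := rfl
  have e5 : ['<'] = ("<" : String).toList := rfl
  have e6 : ['~','='] = ("~=" : String).toList := rfl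
  have e7 : ['['] = ("[" : String).toList := rfl
  have e8 : [']'] = ("]" : String).toList := rfl
  rw [e1, e2, e3, e4, e5, e6, e7, e8]
  by_cases hc1 : 0 ≤ PySem.Chars.find spec.toList ("==" : String).toList
  · rw [if_pos ((pvIsIn_iff spec "==").mpr hc1), if_pos hc1,
      pvSplitPieces spec "==" (by decide) hc1]
    simp only [List.headD_cons, List.getD_cons_succ, List.getD_cons_zero]
    rw [pvKeyEq spec "==" hc1, pvVerEq spec "==" hc1]
    simp
  · rw [if_neg (fun hh => hc1 ((pvIsIn_iff spec "==").mp hh)), if_neg hc1]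
    by_cases hc2 : 0 ≤ PySem.Chars.find spec.toList (">=" : String).toList
    · rw [if_pos ((pvIsIn_iff spec ">=").mpr hc2), if_pos hc2,
        pvSplitPieces spec ">=" (by decide) hc2]
      simp only [List.headD_cons, List.getD_cons_succ, List.getD_cons_zero]
      rw [pvKeyEq spec ">=" hc2, pvVerEq spec ">=" hc2]
    · rw [if_neg (fun hh => hc2 ((pvIsIn_iff spec ">=").mp hh)), if_neg hc2]
      by_cases hc3 : 0 ≤ PySem.Chars.find spec.toList ("<=" : String).toList
      · rw [if_pos ((pvIsIn_iff spec "<=").mpr hc3), if_pos hc3,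
          pvSplitPieces spec "<=" (by decide) hc3]
        simp only [List.headD_cons, List.getD_cons_succ, List.getD_cons_zero]
        rw [pvKeyEq spec "<=" hc3, pvVerEq spec "<=" hc3]
      · rw [if_neg (fun hh => hc3 ((pvIsIn_iff spec "<=").mp hh)), if_neg hc3]
        by_cases hc4 : 0 ≤ PySem.Chars.find spec.toList (">" : String).toList
        · rw [if_pos ((pvIsIn_iff spec ">").mpr hc4), if_pos hc4,
            pvSplitPieces spec ">" (by decide) hc4]
          simp only [List.headD_cons, List.getD_cons_succ, List.getD_cons_zero]
          rw [pvKeyEq spec ">" hc4, pvVerEq spec ">" hc4]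
        · rw [if_neg (fun hh => hc4 ((pvIsIn_iff spec ">").mp hh)), if_neg hc4]
          by_cases hc5 : 0 ≤ PySem.Chars.find spec.toList ("<" : String).toList
          · rw [if_pos ((pvIsIn_iff spec "<").mpr hc5), if_pos hc5,
              pvSplitPieces spec "<" (by decide) hc5]
            simp only [List.headD_cons, List.getD_cons_succ, List.getD_cons_zero]
            rw [pvKeyEq spec "<" hc5, pvVerEq spec "<" hc5]
          · rw [if_neg (fun hh => hc5 ((pvIsIn_iff spec "<").mp hh)), if_neg hc5]
            by_cases hc6 : 0 ≤ PySem.Chars.find spec.toList ("~=" : String).toList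
            · rw [if_pos ((pvIsIn_iff spec "~=").mpr hc6), if_pos hc6,
                pvSplitPieces spec "~=" (by decide) hc6]
              simp only [List.headD_cons, List.getD_cons_succ, List.getD_cons_zero]
              rw [pvKeyEq spec "~=" hc6, pvVerEq spec "~=" hc6]
            · rw [if_neg (fun hh => hc6 ((pvIsIn_iff spec "~=").mp hh)), if_neg hc6]
              have hname : (if (PySem.Str.isIn "[" spec && PySem.Str.isIn "]" spec) = true
                    then PySem.Str.strip (((PySem.Str.splitMax? spec "[" 1).getD []).headD "")
                    else spec)
                  = (if 0 ≤ PySem.Chars.find spec.toList ("[" : String).toList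
                        ∧ PySem.Chars.isIn ("]" : String).toList spec.toList = true
                    then PySem.Str.strip (PySem.Str.slice spec none
                          (some (PySem.Chars.find spec.toList ("[" : String).toList)))
                    else spec) := by
                by_cases hb1 : 0 ≤ PySem.Chars.find spec.toList ("[" : String).toList
                · by_cases hb2 : PySem.Chars.isIn ("]" : String).toList spec.toList = true
                  · rw [if_pos (by rw [(pvIsIn_iff spec "[").mpr hb1, PySem.Str.isIn_eq, hb2]; rfl),
                      if_pos ⟨hb1, hb2⟩, pvSplitPieces spec "[" (by decide) hb1]
                    simp only [List.headD_cons]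
                    rw [pvKeyEq spec "[" hb1]
                  · have ha : ¬ ((PySem.Str.isIn "[" spec && PySem.Str.isIn "]" spec) = true) := by
                      intro hh
                      have h2 := Bool.and_elim_right hh
                      rw [PySem.Str.isIn_eq] at h2
                      exact hb2 h2
                    rw [if_neg ha, if_neg (fun hh => hb2 hh.2)]
                · have ha : ¬ ((PySem.Str.isIn "[" spec && PySem.Str.isIn "]" spec) = true) := by
                    intro hh
                    exact hb1 ((pvIsIn_iff spec "[").mp (Bool.and_elim_left hh))
                  rw [if_neg ha, if_neg (fun hh => hb1 hh.1)]
              rw [hname]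

theorem pvLine_eq (d : PySem.Dict String String) (raw : String) :
    pvALine d raw = pvBLine d raw := by
  unfold pvALine pvBLine
  dsimp only
  split_ifs with h
  · rfl
  · exact pvSpec_eq d _

-- ===== VERDICT (by name: the statement is the Claim_ definition above) =====
theorem parse_requirements_txt_spec : Claim_equal_parse_requirements_txt := by
  intro content _
  unfold Spec_parse_requirements_txt parse_requirements_txt parse_requirements_txt_alt
  have h : pvALine = pvBLine := funext fun d => funext fun r => pvLine_eq d r
  rw [h]
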